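-- pv_equiv track=rewrite | github.com/raulpenaguiao/VoronoiCellToolBox | VoronoiCellToolBox/macaulay_parsing.py | PrintWithBreaks
-- ===== SOURCE A (Python) =====
-- def PrintWithBreaks(string, nChar):
--     ans = ""
--     counter = 0
--     for c in string:
--         ans += c
--         counter += 1
--         if counter == nChar:
--             if c in ["-", "0", "1", "2", "3", "4", "5", "6", "7", "8", "9", "m", "a", "t", "r", "i", "x"]:
--                 counter -= 1
--             else:
--                 ans += "\n "
--                 counter = 0
--     return ans
-- ===== SOURCE B (Python) =====
-- def PrintWithBreaks(string, nChar):
--     # Pass 1: find the break positions; Pass 2: slice and join with "\n ".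
--     special = set("-0123456789matrix")
--     breaks = []
--     counter = 0
--     for i, c in enumerate(string):
--         counter += 1
--         if counter == nChar:
--             if c in special:
--                 counter -= 1
--             else:
--                 breaks.append(i + 1)
--                 counter = 0
--     pieces = []
--     prev = 0
--     for b in breaks:
--         pieces.append(string[prev:b])
--         prev = b
--     pieces.append(string[prev:])
--     return "\n ".join(pieces)
-- ===== Notes on version B (the rewrite author's own statement) =====
-- stated objective: alternative
-- what changed: Instead of growing the answer by per-character string concatenation, B first records the break indices in one pass and then slices the input at those indices and joins the pieces with '\n '.
import Mathlib
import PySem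

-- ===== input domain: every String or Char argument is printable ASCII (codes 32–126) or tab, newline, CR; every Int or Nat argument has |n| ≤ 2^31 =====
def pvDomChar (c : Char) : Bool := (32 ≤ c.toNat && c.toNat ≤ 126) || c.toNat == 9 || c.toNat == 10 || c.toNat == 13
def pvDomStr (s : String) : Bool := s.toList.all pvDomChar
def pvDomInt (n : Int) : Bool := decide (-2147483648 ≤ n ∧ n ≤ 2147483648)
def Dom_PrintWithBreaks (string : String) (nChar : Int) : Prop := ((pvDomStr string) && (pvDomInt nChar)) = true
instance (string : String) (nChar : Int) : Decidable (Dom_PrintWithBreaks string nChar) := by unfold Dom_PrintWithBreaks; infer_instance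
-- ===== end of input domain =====

-- B differs from A by decomposition: it records break indices in one pass, then slices the input there and joins with "\n ", instead of growing the answer by concatenation.

-- ===== PORT A =====
-- the literal list A tests membership in
def pvSpecialList : List Char :=
  ['-', '0', '1', '2', '3', '4', '5', '6', '7', '8', '9', 'm', 'a', 't', 'r', 'i', 'x']

-- A's for-loop: state (ans, counter), one step per character
def pvLoopA (nChar : Int) : List Char → List Char → Int → List Char
  | [], ans, _ => ans
  | c :: cs, ans, counter =>
      let ans := ans ++ [c]
      let counter := counter + 1
      if counter = nChar then
        if c ∈ pvSpecialList then pvLoopA nChar cs ans (counter - 1)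
        else pvLoopA nChar cs (ans ++ ['\n', ' ']) 0
      else pvLoopA nChar cs ans counter

def PrintWithBreaks (string : String) (nChar : Int) : String :=
  String.ofList (pvLoopA nChar string.toList [] 0)

-- ===== PORT B =====
-- B's special-character set: set("-0123456789matrix")
def pvSpecialSet : PySem.Set Char :=
  PySem.Set.ofList ['-', '0', '1', '2', '3', '4', '5', '6', '7', '8', '9', 'm', 'a', 't', 'r', 'i', 'x']

-- B's pass 1: enumerate the characters, collect the break indices
def pvBreaks (nChar : Int) : List Char → Nat → Int → List Nat
  | [], _, _ => []
  | c :: cs, i, counter =>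
      let counter := counter + 1
      if counter = nChar then
        if PySem.Set.contains pvSpecialSet c then pvBreaks nChar cs (i + 1) (counter - 1)
        else (i + 1) :: pvBreaks nChar cs (i + 1) 0
      else pvBreaks nChar cs (i + 1) counter

-- B's pass 2: the pieces string[prev:b] for consecutive breaks, plus the final string[prev:]
def pvPieces (s : List Char) : Nat → List Nat → List (List Char)
  | prev, [] => [PySem.List.slice s (some (prev : Int)) none]
  | prev, b :: bs => PySem.List.slice s (some (prev : Int)) (some (b : Int)) :: pvPieces s b bs

def PrintWithBreaks_alt (string : String) (nChar : Int) : String :=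
  let cs := string.toList
  String.ofList (PySem.Chars.join ['\n', ' '] (pvPieces cs 0 (pvBreaks nChar cs 0 0)))

-- ===== PRECONDITION & SPEC =====
def Spec_PrintWithBreaks (string : String) (nChar : Int) (out : String) : Prop := out = PrintWithBreaks_alt string nChar
instance (string : String) (nChar : Int) (out : String) : Decidable (Spec_PrintWithBreaks string nChar out) := by unfold Spec_PrintWithBreaks; infer_instance

-- ===== CLAIM (what is proved, stated in full; the proofs are below) =====
def Claim_equal_PrintWithBreaks : Prop := ∀ (string : String) (nChar : Int), Dom_PrintWithBreaks string nChar → Spec_PrintWithBreaks string nChar (PrintWithBreaks string nChar)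

-- ===== LEMMAS AND PROOFS =====

-- the two membership tests agree
theorem pv_mem_special (c : Char) :
    (PySem.Set.contains pvSpecialSet c = true) ↔ c ∈ pvSpecialList := by
  unfold pvSpecialSet pvSpecialList
  rw [PySem.Set.contains_iff, PySem.Set.mem_ofList]

-- every break produced from position i lies strictly beyond i
theorem pvBreaks_ge (nChar : Int) :
    ∀ (cs : List Char) (i : Nat) (counter : Int) (b : Nat),
      b ∈ pvBreaks nChar cs i counter → i + 1 ≤ b := by
  intro cs
  induction cs with
  | nil => intro i counter b hb; simp [pvBreaks] at hb
  | cons c cs ih =>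
      intro i counter b hb
      unfold pvBreaks at hb
      simp only at hb
      split at hb
      · split at hb
        · have := ih (i + 1) _ b hb; omega
        · rcases List.mem_cons.mp hb with h | h
          · omega
          · have := ih (i + 1) 0 b h; omega
      · have := ih (i + 1) _ b hb; omega

-- prepending the current character distributes over the joined pieces
theorem pv_join_step (s : List Char) (i : Nat) (c : Char) (rest : List Char)
    (hdrop : s.drop i = c :: rest) (bs : List Nat) (hbs : ∀ b ∈ bs, i + 1 ≤ b) :
    PySem.Chars.join ['\n', ' '] (pvPieces s i bs)
      = c :: PySem.Chars.join ['\n', ' '] (pvPieces s (i + 1) bs) := by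
  cases bs with
  | nil =>
      simp only [pvPieces, PySem.Chars.join_singleton, PySem.List.slice_from_natCast]
      rw [hdrop]
      have : s.drop (i + 1) = rest := by
        rw [← List.drop_drop, hdrop]; simp
      rw [this]
  | cons b bs' =>
      have hb : i + 1 ≤ b := hbs b (by simp)
      simp only [pvPieces]
      have hne : pvPieces s b bs' ≠ [] := by cases bs' <;> simp [pvPieces]
      obtain ⟨p, ps, hps⟩ : ∃ p ps, pvPieces s b bs' = p :: ps := by
        cases h : pvPieces s b bs' with
        | nil => exact absurd h hne
        | cons p ps => exact ⟨p, ps, rfl⟩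
      rw [hps, PySem.Chars.join_cons_cons, PySem.Chars.join_cons_cons]
      have h1 : PySem.List.slice s (some (i : Int)) (some (b : Int))
          = c :: PySem.List.slice s (some ((i + 1 : Nat) : Int)) (some (b : Int)) := by
        rw [PySem.List.slice_natCast, PySem.List.slice_natCast, hdrop]
        have : s.drop (i + 1) = rest := by
          rw [← List.drop_drop, hdrop]; simp
        rw [this]
        have hb1 : b - i = (b - (i + 1)) + 1 := by omega
        rw [hb1, List.take_succ_cons]
      rw [h1]
      simp

-- main invariant: A's loop result is the accumulator followed by B's joined pieces
theorem pv_main (nChar : Int) (s : List Char) :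
    ∀ (cs : List Char) (i : Nat) (counter : Int) (acc : List Char),
      s.drop i = cs →
      pvLoopA nChar cs acc counter
        = acc ++ PySem.Chars.join ['\n', ' '] (pvPieces s i (pvBreaks nChar cs i counter)) := by
  intro cs
  induction cs with
  | nil =>
      intro i counter acc hdrop
      simp [pvLoopA, pvBreaks, pvPieces, PySem.Chars.join_singleton,
        PySem.List.slice_from_natCast, hdrop]
  | cons c cs ih =>
      intro i counter acc hdrop
      have hdrop' : s.drop (i + 1) = cs := by
        rw [← List.drop_drop, hdrop]; simp
      unfold pvLoopA pvBreaks
      simp only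
      by_cases hcnt : counter + 1 = nChar
      · rw [if_pos hcnt, if_pos hcnt]
        by_cases hsp : c ∈ pvSpecialList
        · rw [if_pos hsp, if_pos ((pv_mem_special c).mpr hsp)]
          rw [ih (i + 1) (counter + 1 - 1) (acc ++ [c]) hdrop']
          rw [pv_join_step s i c cs hdrop _ (fun b hb => pvBreaks_ge nChar cs (i + 1) _ b hb |>.trans' (by omega))]
          simp
        · rw [if_neg hsp, if_neg (fun h => hsp ((pv_mem_special c).mp h))]
          rw [ih (i + 1) 0 (acc ++ [c] ++ ['\n', ' ']) hdrop']
          have hne : pvPieces s (i + 1) (pvBreaks nChar cs (i + 1) 0) ≠ [] := by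
            cases pvBreaks nChar cs (i + 1) 0 <;> simp [pvPieces]
          obtain ⟨p, ps, hps⟩ : ∃ p ps, pvPieces s (i + 1) (pvBreaks nChar cs (i + 1) 0) = p :: ps := by
            cases h : pvPieces s (i + 1) (pvBreaks nChar cs (i + 1) 0) with
            | nil => exact absurd h hne
            | cons p ps => exact ⟨p, ps, rfl⟩
          conv_rhs => rw [pvPieces]
          rw [hps, PySem.Chars.join_cons_cons]
          have h1 : PySem.List.slice s (some (i : Int)) (some ((i + 1 : Nat) : Int)) = [c] := by
            rw [PySem.List.slice_natCast, hdrop]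
            have : i + 1 - i = 1 := by omega
            rw [this]; rfl
          rw [h1]
          simp
      · rw [if_neg hcnt, if_neg hcnt]
        rw [ih (i + 1) (counter + 1) (acc ++ [c]) hdrop']
        rw [pv_join_step s i c cs hdrop _ (fun b hb => pvBreaks_ge nChar cs (i + 1) _ b hb |>.trans' (by omega))]
        simp

-- ===== VERDICT (by name: the statement is the Claim_ definition above) =====
theorem PrintWithBreaks_spec : Claim_equal_PrintWithBreaks := by
  intro string nChar _
  unfold Spec_PrintWithBreaks PrintWithBreaks PrintWithBreaks_alt
  rw [pv_main nChar string.toList string.toList 0 0 [] (by simp)]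
  simp
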